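-- pv_equiv track=rewrite | github.com/recepcanaltinbag/trap-seq | insert_finder_from_bam.py | find_zero_sequences
-- ===== SOURCE A (Python) =====
-- def find_zero_sequences(arr):
--     zero_sequences = []
--     start = None
--     length = 0
--
--     for i, num in enumerate(arr):
--         if num == 0:
--             if start is None:
--                 start = i
--             length += 1
--         else:
--             if start is not None:
--                 zero_sequences.append((start, i - 1, length))
--                 start = None
--                 length = 0
--
--     if start is not None:
--         zero_sequences.append((start, len(arr) - 1, length))
--
--     return zero_sequences
-- ===== SOURCE B (Python) =====
-- def find_zero_sequences(arr):
--     res = []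
--     i = 0
--     n = len(arr)
--     while i < n:
--         if arr[i] == 0:
--             j = i + 1
--             while j < n and arr[j] == 0:
--                 j += 1
--             res.append((i, j - 1, j - i))
--             i = j
--         else:
--             i += 1
--     return res
-- ===== Notes on version B (the rewrite author's own statement) =====
-- stated objective: alternative
-- what changed: Replaces A's single-pass start/length state machine (Option start, pending-run bookkeeping, post-loop flush) with a two-pointer scan: on each zero, an inner loop scans ahead to the end of the run and emits the whole triple at once, so there is no carried state and no final flush.
import Mathlib
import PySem

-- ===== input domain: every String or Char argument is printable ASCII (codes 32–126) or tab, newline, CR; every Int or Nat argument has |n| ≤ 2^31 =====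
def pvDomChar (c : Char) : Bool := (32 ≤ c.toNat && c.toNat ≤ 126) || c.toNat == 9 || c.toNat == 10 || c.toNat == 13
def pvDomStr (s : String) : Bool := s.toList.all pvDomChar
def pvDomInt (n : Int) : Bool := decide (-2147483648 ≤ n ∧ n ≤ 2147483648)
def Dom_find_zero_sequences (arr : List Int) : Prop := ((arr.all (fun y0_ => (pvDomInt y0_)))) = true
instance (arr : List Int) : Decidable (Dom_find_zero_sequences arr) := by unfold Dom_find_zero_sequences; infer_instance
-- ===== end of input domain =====

-- B replaces A's start/length state machine with a two-pointer run scan; objective: alternative (same cost).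


-- ===== PORT A =====
-- the body of A's for-loop, as a named step function over the state (zero_sequences, start, length)
def stepA (s : List (Int × Int × Int) × Option Int × Int) (p : Int × Int) :
    List (Int × Int × Int) × Option Int × Int :=
  let zs := s.1; let start := s.2.1; let length := s.2.2
  let i := p.1; let num := p.2
  if num = 0 then
    (zs, (match start with | none => some i | some s0 => some s0), length + 1)
  else
    match start with
    | some s0 => (zs ++ [(s0, i - 1, length)], none, 0)
    | none => (zs, none, length)

def find_zero_sequences (arr : List Int) : List (Int × Int × Int) :=
  let st := (PySem.List.enumerate arr 0).foldl stepA ([], none, 0)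
  match st.2.1 with
  | some s0 => st.1 ++ [(s0, (arr.length : Int) - 1, st.2.2)]
  | none => st.1

-- ===== PORT B =====
-- length of the leading run of zeros (B's inner while-loop advance)
def zrun : List Int → Nat
  | [] => 0
  | x :: xs => if x = 0 then 1 + zrun xs else 0

-- B's outer while-loop: on a zero, scan the whole run and emit one triple
def altGo : List Int → Int → List (Int × Int × Int)
  | [], _ => []
  | x :: xs, i =>
    if x = 0 then
      let k : Nat := 1 + zrun xs
      (i, i + (k : Int) - 1, (k : Int)) :: altGo (xs.drop (zrun xs)) (i + (k : Int))
    else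
      altGo xs (i + 1)
termination_by l => l.length
decreasing_by
  · simp [List.length_drop]
  · simp

def find_zero_sequences_alt (arr : List Int) : List (Int × Int × Int) :=
  altGo arr 0

-- ===== PRECONDITION & SPEC =====
def Spec_find_zero_sequences (arr : List Int) (out : List (Int × Int × Int)) : Prop := out = find_zero_sequences_alt arr
instance (arr : List Int) (out : List (Int × Int × Int)) : Decidable (Spec_find_zero_sequences arr out) := by unfold Spec_find_zero_sequences; infer_instance

-- ===== CLAIM (what is proved, stated in full; the proofs are below) =====
def Claim_equal_find_zero_sequences : Prop := ∀ (arr : List Int), Dom_find_zero_sequences arr → Spec_find_zero_sequences arr (find_zero_sequences arr)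

-- ===== LEMMAS AND PROOFS =====

-- A's post-loop flush, parameterised by the end bound e = start-index + length of the remaining list
def finishAt (e : Int) (st : List (Int × Int × Int) × Option Int × Int) : List (Int × Int × Int) :=
  match st.2.1 with
  | some s0 => st.1 ++ [(s0, e - 1, st.2.2)]
  | none => st.1

lemma altGo_nil (i : Int) : altGo [] i = [] := by rw [altGo]

lemma altGo_cons (x : Int) (xs : List Int) (i : Int) :
    altGo (x :: xs) i =
      if x = 0 then
        (i, i + ((1 + zrun xs : Nat) : Int) - 1, ((1 + zrun xs : Nat) : Int))
          :: altGo (xs.drop (zrun xs)) (i + ((1 + zrun xs : Nat) : Int))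
      else altGo xs (i + 1) := by
  rw [altGo]

lemma drop_zrun_shape (l : List Int) :
    l.drop (zrun l) = [] ∨ ∃ y rest, l.drop (zrun l) = y :: rest ∧ y ≠ 0 := by
  induction l with
  | nil => left; simp
  | cons x xs ih =>
    by_cases hx : x = 0
    · have hz : zrun (x :: xs) = zrun xs + 1 := by simp [zrun, hx, Nat.add_comm]
      rw [hz, List.drop_succ_cons]; exact ih
    · right; exact ⟨x, xs, by simp [zrun, hx], hx⟩

lemma altGo_skip (xs : List Int) (j : Int) :
    altGo (xs.drop (zrun xs)) j = altGo (xs.drop (zrun xs + 1)) (j + 1) := by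
  rcases drop_zrun_shape xs with h | ⟨y, rest, h, hy⟩
  · have h1 : xs.drop (zrun xs + 1) = [] := by
      have := List.drop_eq_nil_iff.mp h
      exact List.drop_eq_nil_iff.mpr (by omega)
    simp [h, h1, altGo_nil]
  · have h1 : xs.drop (zrun xs + 1) = rest := by
      rw [← List.tail_drop, h]; rfl
    rw [h, h1, altGo_cons]
    simp [hy]

lemma main_both (l : List Int) :
    (∀ (i : Int) (acc : List (Int × Int × Int)),
      finishAt (i + l.length) ((PySem.List.enumerate l i).foldl stepA (acc, none, 0))
        = acc ++ altGo l i) ∧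
    (∀ (i : Int) (acc : List (Int × Int × Int)) (s0 len : Int),
      finishAt (i + l.length) ((PySem.List.enumerate l i).foldl stepA (acc, some s0, len))
        = (acc ++ [(s0, i + (zrun l : Int) - 1, len + (zrun l : Int))])
            ++ altGo (l.drop (zrun l + 1)) (i + (zrun l : Int) + 1)) := by
  induction l with
  | nil =>
    constructor
    · intro i acc; simp [PySem.List.enumerate_nil, finishAt, altGo_nil]
    · intro i acc s0 len; simp [PySem.List.enumerate_nil, finishAt, zrun, altGo_nil]
  | cons x xs ih =>
    obtain ⟨ihn, ihs⟩ := ih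
    have harith : ∀ i : Int, i + ((x :: xs).length : Int) = (i + 1) + (xs.length : Int) := by
      intro i; simp; ring
    constructor
    · intro i acc
      rw [PySem.List.enumerate_cons]
      simp only [List.foldl_cons]
      by_cases hx : x = 0
      · have hst : stepA (acc, none, 0) (i, x) = (acc, some i, 1) := by
          simp [stepA, hx]
        rw [hst, harith, ihs (i + 1) acc i 1, altGo_cons]
        simp only [hx, if_pos]
        rw [altGo_skip xs (i + ((1 + zrun xs : Nat) : Int))]
        simp only [List.append_assoc, List.singleton_append, List.cons.injEq,
          List.append_cancel_left_eq, Prod.mk.injEq]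
        refine ⟨⟨trivial, by push_cast; ring, by push_cast; ring⟩, ?_⟩
        congr 1
        push_cast; ring
      · have hst : stepA (acc, none, 0) (i, x) = (acc, none, 0) := by
          simp [stepA, hx]
        rw [hst, harith, ihn (i + 1) acc, altGo_cons]
        simp [hx]
    · intro i acc s0 len
      rw [PySem.List.enumerate_cons]
      simp only [List.foldl_cons]
      by_cases hx : x = 0
      · have hst : stepA (acc, some s0, len) (i, x) = (acc, some s0, len + 1) := by
          simp [stepA, hx]
        have hz : zrun (x :: xs) = 1 + zrun xs := by simp [zrun, hx]
        have hd : (x :: xs).drop (1 + zrun xs + 1) = xs.drop (zrun xs + 1) := by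
          have h2 : 1 + zrun xs + 1 = (zrun xs + 1) + 1 := by omega
          rw [h2, List.drop_succ_cons]
        rw [hst, harith, ihs (i + 1) acc s0 (len + 1), hz, hd]
        simp only [List.append_assoc, List.singleton_append, List.cons.injEq,
          List.append_cancel_left_eq, Prod.mk.injEq]
        refine ⟨⟨trivial, by push_cast; ring, by push_cast; ring⟩, ?_⟩
        congr 1
        push_cast; ring
      · have hst : stepA (acc, some s0, len) (i, x) = (acc ++ [(s0, i - 1, len)], none, 0) := by
          simp [stepA, hx]
        have hz : zrun (x :: xs) = 0 := by simp [zrun, hx]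
        rw [hst, harith, ihn (i + 1) (acc ++ [(s0, i - 1, len)]), hz]
        simp

-- ===== VERDICT (by name: the statement is the Claim_ definition above) =====
theorem find_zero_sequences_spec : Claim_equal_find_zero_sequences := by
  intro arr _
  unfold Spec_find_zero_sequences find_zero_sequences find_zero_sequences_alt
  have h := (main_both arr).1 0 []
  simp only [zero_add] at h
  simpa [finishAt] using h
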